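-- pv_equiv track=rewrite | github.com/alemish04/programming_practics_2_sem | task4.py | array_operations
-- ===== SOURCE A (Python) =====
-- def array_operations(arr):
--     product = 1
--     sum = 0
--     for i in range(len(arr)):
--         if i % 2 == 0:
--             product *= arr[i]
--         else:
--             sum += arr[i]
--     return product, sum
-- ===== SOURCE B (Python) =====
-- import math
--
-- def array_operations(arr):
--     # staged passes over the parity slices: no loop, no index arithmetic
--     return math.prod(arr[::2]), sum(arr[1::2])
-- ===== Notes on version B (the rewrite author's own statement) =====
-- stated objective: idiomatic
-- what changed: Replaced the single index loop branching on i % 2 with two staged reductions over materialized parity slices: math.prod(arr[::2]) and sum(arr[1::2]); no explicit loop, index arithmetic or parity test remains.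
import Mathlib
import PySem

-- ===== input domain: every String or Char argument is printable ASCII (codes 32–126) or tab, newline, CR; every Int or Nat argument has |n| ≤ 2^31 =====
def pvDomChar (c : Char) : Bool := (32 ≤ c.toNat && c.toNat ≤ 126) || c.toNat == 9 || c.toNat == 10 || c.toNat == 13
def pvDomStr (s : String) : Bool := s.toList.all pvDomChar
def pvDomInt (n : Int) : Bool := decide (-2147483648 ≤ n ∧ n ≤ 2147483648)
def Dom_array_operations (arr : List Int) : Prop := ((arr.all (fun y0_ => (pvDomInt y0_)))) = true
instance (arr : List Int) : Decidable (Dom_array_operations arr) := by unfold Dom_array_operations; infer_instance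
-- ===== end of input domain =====

-- B replaces A's single index loop branching on i % 2 with two staged reductions
-- over the parity slices arr[::2] and arr[1::2]; alternative decomposition, same cost.

-- ===== PORT A =====
def array_operations (arr : List Int) : Int × Int :=
  (PySem.List.pyRange 0 (PySem.List.len arr) 1).foldl
    (fun (st : Int × Int) i =>
      if PySem.Int.mod i 2 == 0 then (st.1 * PySem.List.pyGetD arr i 0, st.2)
      else (st.1, st.2 + PySem.List.pyGetD arr i 0))
    (1, 0)

-- ===== PORT B =====
-- arr[::2] / arr[1::2] → PySem.List.slice?; math.prod / sum → List.prod / List.sum.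
-- slice? returns none only for step = 0, so getD [] never fires.
def array_operations_alt (arr : List Int) : Int × Int :=
  (((PySem.List.slice? arr none none 2).getD []).prod,
   ((PySem.List.slice? arr (some 1) none 2).getD []).sum)

-- ===== PRECONDITION & SPEC =====
def Spec_array_operations (arr : List Int) (out : Int × Int) : Prop := out = array_operations_alt arr
instance (arr : List Int) (out : Int × Int) : Decidable (Spec_array_operations arr out) := by unfold Spec_array_operations; infer_instance

-- ===== CLAIM (what is proved, stated in full; the proofs are below) =====
def Claim_equal_array_operations : Prop := ∀ (arr : List Int), Dom_array_operations arr → Spec_array_operations arr (array_operations arr)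

-- ===== LEMMAS AND PROOFS =====

-- reference recursive description of the (product-of-even-index, sum-of-odd-index) pair
def pvRec : List Int → Int × Int
  | [] => (1, 0)
  | [x] => (x, 0)
  | x :: y :: rest =>
      let ps := pvRec rest
      (x * ps.1, y + ps.2)

-- the even-index subsequence
def pvEvens : List Int → List Int
  | [] => []
  | [x] => [x]
  | x :: _ :: r => x :: pvEvens r

-- the loop body of A, applied to an (index, value) pair
def pvBody (st : Int × Int) (ix : Int × Int) : Int × Int :=
  if PySem.Int.mod ix.1 2 == 0 then (st.1 * ix.2, st.2) else (st.1, st.2 + ix.2)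

lemma pvLoop (arr : List Int) : ∀ (p q n : Int), n % 2 = 0 →
    (PySem.List.enumerate arr n).foldl pvBody (p, q)
      = (p * (pvRec arr).1, q + (pvRec arr).2) := by
  induction arr using pvRec.induct with
  | case1 =>
      intro p q n _
      simp [PySem.List.enumerate, pvRec]
  | case2 x =>
      intro p q n hn
      simp [PySem.List.enumerate, pvRec, pvBody, PySem.Int.mod, Int.fmod_eq_emod, hn]
  | case3 x y rest ih =>
      intro p q n hn
      have h1 : (n + 1) % 2 = 1 := by omega
      have hm0 : PySem.Int.mod n 2 == 0 := by
        simp [PySem.Int.mod, Int.fmod_eq_emod, hn]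
      have hm1 : (PySem.Int.mod (n + 1) 2 == 0) = false := by
        simp [PySem.Int.mod, Int.fmod_eq_emod, h1]
      simp only [PySem.List.enumerate, List.foldl_cons, pvBody, hm0, hm1,
        if_true, Bool.false_eq_true, if_false]
      simpa [pvRec, mul_assoc, add_assoc, add_comm, add_left_comm]
        using ih (p * x) (q + y) (n + 1 + 1) (by omega)

lemma pvA_eq_rec (arr : List Int) : array_operations arr = pvRec arr := by
  unfold array_operations
  have hbody : (fun (st : Int × Int) (i : Int) =>
      if PySem.Int.mod i 2 == 0 then (st.1 * PySem.List.pyGetD arr i 0, st.2)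
      else (st.1, st.2 + PySem.List.pyGetD arr i 0))
      = (fun (st : Int × Int) (i : Int) => pvBody st (i, PySem.List.pyGetD arr i 0)) := rfl
  rw [hbody, ← List.foldl_map, ← PySem.List.enumerate_eq_map_pyRange arr 0]
  simp [pvLoop arr 1 0 0 (by omega)]

-- pvEvens over a cons in terms of the tail
lemma pvEvens_cons (a : Int) (l : List Int) : pvEvens (a :: l) = a :: pvEvens l.tail := by
  cases l <;> simp [pvEvens]

-- pvRec is (product of even-index elements, sum of odd-index elements)
lemma pvRec_eq_evens (arr : List Int) :
    pvRec arr = ((pvEvens arr).prod, (pvEvens arr.tail).sum) := by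
  induction arr using pvRec.induct with
  | case1 => simp [pvRec, pvEvens]
  | case2 x => simp [pvRec, pvEvens]
  | case3 x y rest ih =>
      simp only [pvRec, pvEvens, List.tail_cons, pvEvens_cons y rest,
        List.prod_cons, List.sum_cons, ih]

-- xs[::2] picks exactly the even-index subsequence (index form)
lemma pvFm (xs : List Int) :
    List.filterMap (fun k => xs[2*k]?) (List.range ((xs.length+1)/2)) = pvEvens xs := by
  induction xs using pvEvens.induct with
  | case1 => simp [pvEvens]
  | case2 x => simp [pvEvens]
  | case3 x y r ih =>
      have hc : ((x :: y :: r).length + 1)/2 = (r.length+1)/2 + 1 := by simp; omega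
      rw [hc, List.range_succ_eq_map]
      simp only [List.filterMap_cons, List.filterMap_map]
      have h0 : (x :: y :: r)[2*0]? = some x := by simp
      simp only [h0]
      have hstep : ∀ k : Nat, (x :: y :: r)[2*(k+1)]? = r[2*k]? := by
        intro k
        have : 2*(k+1) = 2*k + 2 := by omega
        simp [this, List.getElem?_cons_succ]
      simp only [Function.comp, Nat.succ_eq_add_one, hstep]
      rw [pvEvens, ← ih]

lemma pvSlice2 (xs : List Int) : PySem.List.slice? xs none none 2 = some (pvEvens xs) := by
  rw [PySem.List.slice?, PySem.List.sliceIndices]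
  norm_num
  rw [← pvFm xs]
  by_cases h : 0 < xs.length
  · rw [if_pos h]
    have hc : (((xs.length:Int) + 2 - 1) / 2).toNat = (xs.length + 1)/2 := by omega
    rw [hc]
    apply List.filterMap_congr
    intro k _
    congr 1
  · have h0 : xs.length = 0 := by omega
    match xs, h0 with
    | [], _ => simp

lemma pvSliceOdd (xs : List Int) : PySem.List.slice? xs (some 1) none 2 = some (pvEvens xs.tail) := by
  rw [PySem.List.slice?, PySem.List.sliceIndices]
  norm_num
  by_cases h0 : xs.length = 0
  · match xs, h0 with
    | [], _ => norm_num; rfl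
  · have h1 : (1:Int) ≤ xs.length := by omega
    rw [min_eq_left (by exact_mod_cast h1)]
    rw [← pvFm xs.tail]
    by_cases h : 1 < xs.length
    · rw [if_pos h]
      have hc : (((xs.length:Int) - 1 + 2 - 1) / 2).toNat = (xs.tail.length + 1)/2 := by
        rw [List.length_tail]; omega
      rw [hc]
      apply List.filterMap_congr
      intro k _
      have hk : xs[(1 + 2*(k:Int)).toNat]? = xs.tail[2*k]? := by
        rw [List.getElem?_tail]
        congr 1
        omega
      rw [hk]
    · have hl : xs.length = 1 := by omega
      have ht : xs.tail.length = 0 := by rw [List.length_tail]; omega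
      rw [if_neg h, ht]
      simp [List.eq_nil_of_length_eq_zero ht]

lemma pvB_eq_rec (arr : List Int) : array_operations_alt arr = pvRec arr := by
  rw [array_operations_alt, pvSlice2, pvSliceOdd, pvRec_eq_evens]
  rfl

-- ===== VERDICT (by name: the statement is the Claim_ definition above) =====
theorem array_operations_spec : Claim_equal_array_operations := by
  intro arr _
  unfold Spec_array_operations
  rw [pvA_eq_rec, pvB_eq_rec]
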